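-- pv_equiv track=rewrite | github.com/Jamal135/AoC-2023 | puzzles/day9.py | compute_pattern
-- ===== SOURCE A (Python) =====
-- from typing import List
--
-- def compute_pattern(sequence: List[int]) -> List[List[int]]:
--     sequence_layers = [sequence]
--     base_length = len(sequence_layers[0]) - 1
--     index = 0
--     while True:
--         current_layer = sequence_layers[index]
--         size = range(base_length - index)
--         next_layer = [current_layer[i + 1] - current_layer[i] for i in size]
--         sequence_layers.append(next_layer)
--         if all(value == next_layer[0] for value in next_layer):
--             break
--         index += 1
--     return sequence_layers
-- ===== SOURCE B (Python) =====
-- from typing import List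
--
-- def compute_pattern(sequence: List[int]) -> List[List[int]]:
--     diff = [sequence[i + 1] - sequence[i] for i in range(len(sequence) - 1)]
--     if all(v == diff[0] for v in diff):
--         return [sequence, diff]
--     return [sequence] + compute_pattern(diff)
-- ===== Notes on version B (the rewrite author's own statement) =====
-- stated objective: simpler
-- what changed: Replaced the while-True loop over an index into an accumulated layers list (with the range bound derived arithmetically from the original length) by a direct recursion: compute one difference layer, return [sequence, diff] if it is constant, else cons sequence onto the recursion on diff.
import Mathlib
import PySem

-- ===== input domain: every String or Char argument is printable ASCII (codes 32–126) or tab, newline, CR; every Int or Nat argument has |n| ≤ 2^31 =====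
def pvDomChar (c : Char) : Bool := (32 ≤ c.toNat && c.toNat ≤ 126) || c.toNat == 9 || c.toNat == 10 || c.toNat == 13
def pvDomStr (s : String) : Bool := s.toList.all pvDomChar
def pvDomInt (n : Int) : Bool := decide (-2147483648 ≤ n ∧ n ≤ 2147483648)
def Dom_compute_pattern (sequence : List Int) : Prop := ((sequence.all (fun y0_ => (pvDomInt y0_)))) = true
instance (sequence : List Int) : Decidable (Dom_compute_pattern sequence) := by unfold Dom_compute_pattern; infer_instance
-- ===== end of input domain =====

-- B replaces A's while-loop over an indexed accumulator by a direct recursion on the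
-- difference layer (simpler decomposition; same output, same cost).


-- ===== PORT A =====
-- the while-True loop; `n` is Python's `base_length - index` (invariant: n = cur.length - 1,
-- so all comprehension indices are in range and getD never takes its default).
-- The `| 0` fallback in the else-branch is a totality guard only: with n = 0 the next
-- layer is empty and the `all` check already broke the loop.
def computeLoop : List (List Int) → List Int → Nat → List (List Int)
  | layers, cur, n =>
    let next := (List.range n).map (fun i => cur.getD (i + 1) 0 - cur.getD i 0)
    if next.all (fun v => v == next.headD 0) then layers ++ [next]
    else match n with
      | 0 => layers ++ [next]
      | Nat.succ m => computeLoop (layers ++ [next]) next m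

def compute_pattern (sequence : List Int) : List (List Int) :=
  computeLoop [sequence] sequence (sequence.length - 1)

-- ===== PORT B =====
def compute_pattern_alt (sequence : List Int) : List (List Int) :=
  let diff := (List.range (sequence.length - 1)).map (fun i => sequence.getD (i + 1) 0 - sequence.getD i 0)
  if diff.all (fun v => v == diff.headD 0) then [sequence, diff]
  else sequence :: compute_pattern_alt diff
termination_by sequence.length
decreasing_by
  simp only [List.length_map, List.length_range]
  rename_i h
  rcases Nat.eq_zero_or_pos sequence.length with h0 | h0
  · exfalso; apply h; simp [diff, h0]
  · omega

-- ===== PRECONDITION & SPEC =====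
def Spec_compute_pattern (sequence : List Int) (out : List (List Int)) : Prop := out = compute_pattern_alt sequence
instance (sequence : List Int) (out : List (List Int)) : Decidable (Spec_compute_pattern sequence out) := by unfold Spec_compute_pattern; infer_instance

-- ===== CLAIM (what is proved, stated in full; the proofs are below) =====
def Claim_equal_compute_pattern : Prop := ∀ (sequence : List Int), Dom_compute_pattern sequence → Spec_compute_pattern sequence (compute_pattern sequence)

-- ===== LEMMAS AND PROOFS =====

-- B's result always starts with its argument.
theorem alt_cons (x : List Int) : compute_pattern_alt x = x :: (compute_pattern_alt x).tail := by
  rw [compute_pattern_alt]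
  split <;> simp

-- loop invariant: with n = cur.length - 1, the loop extends the accumulator by
-- exactly the layers B computes below cur.
theorem loop_eq (n : Nat) : ∀ (cur : List Int) (acc : List (List Int)),
    n = cur.length - 1 →
    computeLoop acc cur n = acc ++ (compute_pattern_alt cur).tail := by
  induction n with
  | zero =>
    intro cur acc h
    rw [computeLoop, compute_pattern_alt]
    simp [← h]
  | succ m ih =>
    intro cur acc h
    rw [computeLoop, compute_pattern_alt]
    simp only [← h]
    split
    · simp
    · rw [ih _ _ (by simp), List.append_assoc]
      congr 1
      rw [alt_cons ((List.range (m+1)).map fun i => cur.getD (i+1) 0 - cur.getD i 0)]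
      simp

-- ===== VERDICT (by name: the statement is the Claim_ definition above) =====
theorem compute_pattern_spec : Claim_equal_compute_pattern := by
  intro s _
  unfold Spec_compute_pattern compute_pattern
  rw [loop_eq _ _ _ rfl, alt_cons s]
  simp
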